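-- pv_equiv track=rewrite | github.com/MattiaCincotta/Olicyber | gara cyberchallenge/provamisc.py | parse_cell_ref
-- ===== SOURCE A (Python) =====
-- def parse_cell_ref(s):
--     col_part = ''.join(filter(str.isalpha, s))
--     row_part = ''.join(filter(str.isdigit, s))
--     if not col_part or not row_part:
--         raise ValueError(f"Invalid cell reference: {s}")
--     row_idx = int(row_part) - 1
--     col_idx = 0
--     for char in col_part:
--         col_idx = col_idx * 26 + (ord(char.upper()) - ord('A') + 1)
--     col_idx -= 1
--     return (row_idx, col_idx)
-- ===== SOURCE B (Python) =====
-- def parse_cell_ref(s):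
--     letters = []
--     digits = []
--     for ch in s:
--         if ch.isalpha():
--             letters.append(ch)
--         elif ch.isdigit():
--             digits.append(ch)
--     if not letters or not digits:
--         raise ValueError(f"Invalid cell reference: {s}")
--     col_idx = sum((ord(c.upper()) - 64) * 26 ** p
--                   for p, c in enumerate(reversed(letters))) - 1
--     return (int(''.join(digits)) - 1, col_idx)
-- ===== Notes on version B (the rewrite author's own statement) =====
-- stated objective: alternative
-- what changed: B extracts letters and digits in a single pass over the string (instead of two filter passes) and computes the column index as a right-to-left positional power sum over enumerate(reversed(letters)) instead of A's left-to-right Horner accumulation.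
import Mathlib
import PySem

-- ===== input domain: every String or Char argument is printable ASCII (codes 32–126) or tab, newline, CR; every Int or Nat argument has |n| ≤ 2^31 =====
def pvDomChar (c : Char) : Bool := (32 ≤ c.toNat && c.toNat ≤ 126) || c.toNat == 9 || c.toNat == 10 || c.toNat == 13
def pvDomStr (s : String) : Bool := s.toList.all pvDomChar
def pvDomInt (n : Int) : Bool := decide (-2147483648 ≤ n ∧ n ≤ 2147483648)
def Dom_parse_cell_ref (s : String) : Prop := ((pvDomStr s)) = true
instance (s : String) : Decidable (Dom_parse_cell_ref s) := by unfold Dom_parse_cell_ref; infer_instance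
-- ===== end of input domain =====

-- B: single pass splitting letters/digits + right-to-left positional power sum for the column,
-- vs A's two filter passes + Horner accumulation; same values, 'alternative' objective.

-- ===== PORT A =====
def parse_cell_ref (s : String) : Int × Int :=
  let col_part := s.toList.filter PySem.Chars.isalpha
  let row_part := s.toList.filter PySem.Chars.isdigit
  if col_part = [] ∨ row_part = [] then (0, 0)  -- Python raises ValueError here; excluded by Pre_
  else
    let row_idx : Int := (PySem.Int.ofChars? row_part).getD 0 - 1
    let col_idx : Int := col_part.foldl
      (fun a c => a * 26 + (((PySem.Chars.upperChar c).toNat : Int) - 65 + 1)) 0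
    (row_idx, col_idx - 1)

-- ===== PORT B =====
def parse_cell_ref_alt (s : String) : Int × Int :=
  let parts := s.toList.foldl
    (fun (p : List Char × List Char) ch =>
      if PySem.Chars.isalpha ch then (p.1 ++ [ch], p.2)
      else if PySem.Chars.isdigit ch then (p.1, p.2 ++ [ch]) else p)
    ([], [])
  if parts.1 = [] ∨ parts.2 = [] then (0, 0)  -- Python raises ValueError here; excluded by Pre_
  else
    let col_idx : Int :=
      ((PySem.List.enumerate parts.1.reverse 0).foldl
        (fun acc pc => acc + (((PySem.Chars.upperChar pc.2).toNat : Int) - 64) * 26 ^ pc.1.toNat) 0) - 1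
    ((PySem.Int.ofChars? parts.2).getD 0 - 1, col_idx)

-- ===== PRECONDITION & SPEC =====
-- Pre_: the Python raises ValueError when s has no letter or no digit; exactly those inputs are excluded.
def Pre_parse_cell_ref (s : String) : Prop :=
  (s.toList.any PySem.Chars.isalpha && s.toList.any PySem.Chars.isdigit) = true
instance (s : String) : Decidable (Pre_parse_cell_ref s) := by unfold Pre_parse_cell_ref; infer_instance
def pvWitness_parse_cell_ref : String := "B2"
def Spec_parse_cell_ref (s : String) (out : Int × Int) : Prop := out = parse_cell_ref_alt s
instance (s : String) (out : Int × Int) : Decidable (Spec_parse_cell_ref s out) := by unfold Spec_parse_cell_ref; infer_instance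

-- ===== CLAIM (what is proved, stated in full; the proofs are below) =====
def Claim_equal_parse_cell_ref : Prop := ∀ (s : String), Dom_parse_cell_ref s → Pre_parse_cell_ref s → Spec_parse_cell_ref s (parse_cell_ref s)

-- ===== LEMMAS AND PROOFS =====

lemma pv_digit_not_alpha (c : Char) (h : PySem.Chars.isdigit c = true) :
    PySem.Chars.isalpha c = false := by
  simp [PySem.Chars.isdigit, PySem.Chars.isalpha, PySem.Chars.isupper, PySem.Chars.islower,
        Char.le_def, UInt32.le_iff_toNat_le] at h ⊢
  omega

-- the single pass of B computes exactly A's two filters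
lemma pv_split_eq (l : List Char) (acc : List Char × List Char) :
    l.foldl
      (fun (p : List Char × List Char) ch =>
        if PySem.Chars.isalpha ch then (p.1 ++ [ch], p.2)
        else if PySem.Chars.isdigit ch then (p.1, p.2 ++ [ch]) else p)
      acc
    = (acc.1 ++ l.filter PySem.Chars.isalpha, acc.2 ++ l.filter PySem.Chars.isdigit) := by
  induction l generalizing acc with
  | nil => simp
  | cons c t ih =>
    by_cases ha : PySem.Chars.isalpha c = true
    · have hd : PySem.Chars.isdigit c = false := by
        cases h : PySem.Chars.isdigit c
        · rfl
        · have := pv_digit_not_alpha c h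
          simp [ha] at this
      simp [List.foldl_cons, ih, ha, hd]
    · by_cases hd : PySem.Chars.isdigit c = true
      · simp [List.foldl_cons, ih, ha, hd]
      · simp [List.foldl_cons, ih, ha, hd]

lemma pv_horner_shift (v : Char → Int) (t : List Char) (a : Int) :
    t.foldl (fun x c => x * 26 + v c) a
      = a * 26 ^ t.length + t.foldl (fun x c => x * 26 + v c) 0 := by
  induction t generalizing a with
  | nil => simp
  | cons c t ih =>
    simp only [List.foldl_cons, List.length_cons]
    rw [ih (a * 26 + v c), ih (0 * 26 + v c)]
    ring

lemma pv_pos_eq_horner (v : Char → Int) (l : List Char) :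
    (PySem.List.enumerate l.reverse 0).foldl
        (fun acc pc => acc + v pc.2 * 26 ^ pc.1.toNat) 0
      = l.foldl (fun x c => x * 26 + v c) 0 := by
  induction l with
  | nil => simp
  | cons c t ih =>
    have hl : t.reverse.length = t.length := List.length_reverse
    rw [List.reverse_cons, PySem.List.enumerate_append, List.foldl_append, ih]
    simp only [PySem.List.enumerate_cons, PySem.List.enumerate_nil, List.foldl_cons,
      List.foldl_nil, hl, List.foldl_cons]
    rw [pv_horner_shift v t (0 * 26 + v c)]
    simp [Int.toNat_natCast]
    ring

-- ===== VERDICT (by name: the statement is the Claim_ definition above) =====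
theorem parse_cell_ref_spec : Claim_equal_parse_cell_ref := by
  intro s _ hpre
  unfold Spec_parse_cell_ref parse_cell_ref parse_cell_ref_alt
  rw [pv_split_eq]
  simp only [List.nil_append]
  have hcol : s.toList.filter PySem.Chars.isalpha ≠ [] := by
    unfold Pre_parse_cell_ref at hpre
    simp only [Bool.and_eq_true, List.any_eq_true] at hpre
    obtain ⟨⟨c, hc, hca⟩, _⟩ := hpre
    exact List.ne_nil_of_mem (List.mem_filter.mpr ⟨hc, hca⟩)
  have hrow : s.toList.filter PySem.Chars.isdigit ≠ [] := by
    unfold Pre_parse_cell_ref at hpre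
    simp only [Bool.and_eq_true, List.any_eq_true] at hpre
    obtain ⟨_, ⟨c, hc, hcd⟩⟩ := hpre
    exact List.ne_nil_of_mem (List.mem_filter.mpr ⟨hc, hcd⟩)
  rw [if_neg (by simp [hcol, hrow]), if_neg (by simp [hcol, hrow])]
  have hfun : (fun (acc : Int) (pc : Int × Char) =>
        acc + (((PySem.Chars.upperChar pc.2).toNat : Int) - 64) * 26 ^ pc.1.toNat)
      = fun acc pc => acc + (((PySem.Chars.upperChar pc.2).toNat : Int) - 65 + 1) * 26 ^ pc.1.toNat := by
    funext acc pc; ring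
  rw [hfun, pv_pos_eq_horner (fun c => ((PySem.Chars.upperChar c).toNat : Int) - 65 + 1)]
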